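-- pv_equiv track=rewrite | github.com/abhisheksharma007/LeetCode-Problems | row_cols_equal_nums_2133.py | checkValid1
-- ===== SOURCE A (Python) =====
-- def checkValid1(matrix):
--     for i in matrix:
--         if len(i) != len(set(i)):
--             return False
--
--     for i in zip(*matrix):
--         if len(i) != len(set(i)):
--             return False
--
--     return True
-- ===== SOURCE B (Python) =====
-- def checkValid1(matrix):
--     def has_dup(vals):
--         s = sorted(vals)
--         return any(a == b for a, b in zip(s, s[1:]))
--
--     for row in matrix:
--         if has_dup(row):
--             return False
--     m = min((len(r) for r in matrix), default=0)
--     for j in range(m):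
--         if has_dup([row[j] for row in matrix]):
--             return False
--     return True
-- ===== Notes on version B (the rewrite author's own statement) =====
-- stated objective: alternative
-- what changed: Replaces A's hash-set duplicate detection (len(set(x)) != len(x) on each row and each zip-transposed column) with a sort-based algorithm: each row/column is sorted and scanned for equal adjacent elements, with columns taken by index up to the minimum row length instead of via zip.
import Mathlib
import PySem

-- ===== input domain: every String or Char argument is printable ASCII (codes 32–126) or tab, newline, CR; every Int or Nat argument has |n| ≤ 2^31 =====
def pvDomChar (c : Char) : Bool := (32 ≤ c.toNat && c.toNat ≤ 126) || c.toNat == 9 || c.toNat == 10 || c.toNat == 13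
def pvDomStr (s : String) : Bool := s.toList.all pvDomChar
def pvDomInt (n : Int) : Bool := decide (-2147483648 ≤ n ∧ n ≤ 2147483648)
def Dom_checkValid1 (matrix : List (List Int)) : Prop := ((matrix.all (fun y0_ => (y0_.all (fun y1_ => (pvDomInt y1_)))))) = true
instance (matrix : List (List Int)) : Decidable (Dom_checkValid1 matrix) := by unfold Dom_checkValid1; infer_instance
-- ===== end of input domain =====

-- B replaces A's set-cardinality duplicate test on rows and zip-columns by a
-- sort-then-adjacent-scan duplicate test, reading columns by index up to the
-- minimum row length; same results, a different algorithm (sorting, no sets).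

-- ===== PORT A =====
-- zip(*matrix): the list of columns, truncated to the shortest row (empty when matrix is empty)
def pyZipStar (rows : List (List Int)) : List (List Int) :=
  match rows with
  | [] => []
  | r0 :: rs =>
    let m := rs.foldl (fun acc r => min acc r.length) r0.length
    (List.range m).map (fun j => (r0 :: rs).map (fun row => row.getD j 0))

def checkValid1 (matrix : List (List Int)) : Bool :=
  if matrix.any (fun i => (PySem.Set.ofList i).length != i.length) then false
  else if (pyZipStar matrix).any (fun i => (PySem.Set.ofList i).length != i.length) then false
  else true

-- ===== PORT B =====
-- Source B's has_dup: sort, then any equal adjacent pair (zip(s, s[1:]))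
def bHasDup (vals : List Int) : Bool :=
  let s := PySem.List.sorted vals (fun x => x)
  (s.zip (PySem.List.slice s (some 1) none)).any (fun p => p.1 == p.2)

def checkValid1_alt (matrix : List (List Int)) : Bool :=
  if matrix.any (fun row => bHasDup row) then false
  else
    let m := PySem.List.minD (matrix.map (fun r => r.length)) (fun x => x) 0
    -- range(m) and row[j]: exact, since 0 ≤ j < m ≤ len(row) for every row
    if (List.range m).any (fun j => bHasDup (matrix.map (fun row => row.getD j 0))) then false
    else true

-- ===== PRECONDITION & SPEC =====
def Spec_checkValid1 (matrix : List (List Int)) (out : Bool) : Prop := out = checkValid1_alt matrix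
instance (matrix : List (List Int)) (out : Bool) : Decidable (Spec_checkValid1 matrix out) := by unfold Spec_checkValid1; infer_instance

-- ===== CLAIM (what is proved, stated in full; the proofs are below) =====
def Claim_equal_checkValid1 : Prop := ∀ (matrix : List (List Int)), Dom_checkValid1 matrix → Spec_checkValid1 matrix (checkValid1 matrix)

-- ===== LEMMAS AND PROOFS =====

theorem ofList_sublist (xs : List Int) : (PySem.Set.ofList xs).Sublist xs := by
  induction xs with
  | nil => simp [PySem.Set.ofList, PySem.Set.empty]
  | cons x xs ih =>
    rw [PySem.Set.ofList_cons]
    refine List.Sublist.cons₂ x (List.Sublist.trans ?_ ih)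
    simp only [PySem.Set.discard]
    exact List.filter_sublist

theorem length_ofList_eq_iff (xs : List Int) :
    (PySem.Set.ofList xs).length = xs.length ↔ xs.Nodup := by
  constructor
  · intro h
    have := (ofList_sublist xs).eq_of_length h
    simpa [this] using PySem.Set.nodup_ofList xs
  · intro h
    rw [PySem.Set.ofList_eq_self_of_nodup xs h]

-- A's duplicate test, as a Nodup statement
theorem setlen_bne_eq (v : List Int) :
    ((PySem.Set.ofList v).length != v.length) = !decide v.Nodup := by
  by_cases h : v.Nodup
  · simp [h, (length_ofList_eq_iff v).mpr h]
  · have : (PySem.Set.ofList v).length ≠ v.length := fun hh => h ((length_ofList_eq_iff v).mp hh)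
    simp [h, this]

-- adjacent-equal scan on a ≤-sorted list decides Nodup
theorem adj_any_eq (l : List Int) (hs : l.Pairwise (· ≤ ·)) :
    (l.zip l.tail).any (fun p => p.1 == p.2) = !decide l.Nodup := by
  induction l with
  | nil => simp
  | cons a t ih =>
    cases t with
    | nil => simp
    | cons b t' =>
      obtain ⟨ha, hs'⟩ := List.pairwise_cons.mp hs
      have ih' := ih hs'
      by_cases hab : a = b
      · subst hab
        simp [List.zip]
      · have hab' : (a == b) = false := by simp [hab]
        have hnot : a ∉ b :: t' := by
          intro hm
          rcases List.mem_cons.mp hm with rfl | hm'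
          · exact hab rfl
          · obtain ⟨hb, _⟩ := List.pairwise_cons.mp hs'
            have h1 : a ≤ b := ha b (by simp)
            have h2 : b ≤ a := hb a hm'
            exact hab (le_antisymm h1 h2)
        have hnd : (a :: b :: t').Nodup ↔ (b :: t').Nodup := by
          simp [List.nodup_cons, hnot]
        show ((a == b) || ((b :: t').zip t').any (fun p => p.1 == p.2)) = _
        rw [hab', Bool.false_or]
        have : ((b :: t').zip t').any (fun p => p.1 == p.2) = !decide (b :: t').Nodup := ih'
        rw [this]
        by_cases h : (b :: t').Nodup
        · simp [h, hnd.mpr h]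
        · simp [h]

-- B's duplicate test, as the same Nodup statement
theorem bHasDup_eq (v : List Int) : bHasDup v = !decide v.Nodup := by
  show ((PySem.List.sorted v (fun x => x)).zip
      (PySem.List.slice (PySem.List.sorted v (fun x => x)) (some 1) none)).any
        (fun p => p.1 == p.2) = _
  rw [PySem.List.slice_from_one]
  rw [adj_any_eq _ (PySem.List.sorted_pairwise v (fun x => x))]
  have hperm := PySem.List.sorted_perm v (fun x => x) false
  by_cases h : v.Nodup
  · simp [h, hperm.nodup_iff.mpr h]
  · have hn : ¬(PySem.List.sorted v (fun x => x)).Nodup := fun hh => h (hperm.nodup_iff.mp hh)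
    simp [h, hn]

theorem rowtest_eq (v : List Int) :
    ((PySem.Set.ofList v).length != v.length) = bHasDup v := by
  rw [setlen_bne_eq, bHasDup_eq]

theorem min_len_eq (r0 : List Int) (rs : List (List Int)) :
    rs.foldl (fun acc r => min acc r.length) r0.length =
      PySem.List.minD ((r0 :: rs).map (fun r => r.length)) (fun x => x) 0 := by
  unfold PySem.List.minD
  rw [List.map_cons, PySem.List.min?_id_cons, Option.getD_some, List.foldl_map]

-- ===== VERDICT (by name: the statement is the Claim_ definition above) =====
theorem checkValid1_spec : Claim_equal_checkValid1 := by
  intro matrix _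
  show checkValid1 matrix = checkValid1_alt matrix
  match matrix with
  | [] => rfl
  | r0 :: rs =>
    unfold checkValid1 checkValid1_alt pyZipStar
    rw [← min_len_eq r0 rs]
    rw [List.any_map]
    have h1 : ((r0 :: rs).any (fun i => (PySem.Set.ofList i).length != i.length)) =
        ((r0 :: rs).any (fun row => bHasDup row)) := by
      exact PySem.List.any_congr_mem (fun x _ => rowtest_eq x)
    rw [h1]
    have h2 : ((List.range (rs.foldl (fun acc r => min acc r.length) r0.length)).any
        ((fun i => (PySem.Set.ofList i).length != i.length) ∘
          fun j => (r0 :: rs).map (fun row => row.getD j 0))) =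
        ((List.range (rs.foldl (fun acc r => min acc r.length) r0.length)).any
          (fun j => bHasDup ((r0 :: rs).map (fun row => row.getD j 0)))) :=
      PySem.List.any_congr_mem (fun j _ => rowtest_eq _)
    rw [h2]
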